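-- pv_equiv track=rewrite | github.com/AndrewsPrivateStash/file-name-util | rename_files.py | combine_singles
-- ===== SOURCE A (Python) =====
-- def combine_singles(ls: list[str]) -> list[str]:
-- 	""" combine runs of single alpha elements
-- 	"""
-- 	out = []
-- 	tmp_str = ''
-- 	for s in ls:
-- 		if len(s) == 1:
-- 			tmp_str += s
-- 		else:
-- 			if tmp_str:
-- 				out.append(tmp_str)
-- 				tmp_str = ''
-- 			out.append(s)
--
-- 	if tmp_str:
-- 		out.append(tmp_str)
--
-- 	return out
-- ===== SOURCE B (Python) =====
-- from itertools import groupby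
--
--
-- def combine_singles(ls: list[str]) -> list[str]:
--     out = []
--     for is_single, group in groupby(ls, key=lambda s: len(s) == 1):
--         if is_single:
--             out.append(''.join(group))
--         else:
--             out.extend(group)
--     return out
-- ===== Notes on version B (the rewrite author's own statement) =====
-- stated objective: idiomatic
-- what changed: Replaces the manual tmp_str accumulator with an itertools.groupby decomposition: the list is split into maximal runs by the len==1 predicate, single-char runs are joined, other runs are emitted element-by-element.
import Mathlib
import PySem

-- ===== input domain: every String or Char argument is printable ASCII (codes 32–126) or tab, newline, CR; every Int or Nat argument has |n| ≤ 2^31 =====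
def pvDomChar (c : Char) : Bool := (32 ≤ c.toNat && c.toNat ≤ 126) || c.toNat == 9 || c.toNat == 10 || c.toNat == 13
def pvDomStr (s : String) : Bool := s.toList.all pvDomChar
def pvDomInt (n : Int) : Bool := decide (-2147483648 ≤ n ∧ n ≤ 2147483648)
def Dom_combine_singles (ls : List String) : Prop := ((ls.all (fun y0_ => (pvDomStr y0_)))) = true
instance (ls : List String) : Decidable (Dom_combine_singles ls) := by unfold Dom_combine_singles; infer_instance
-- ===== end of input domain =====

-- B replaces A's manual tmp_str accumulator/flush loop with an itertools.groupby
-- decomposition (maximal runs keyed by len==1, joined or emitted element-wise); idiomatic, same cost.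

-- ===== PORT A =====
-- the for-loop of A over (out, tmp_str); 'if tmp_str:' is the nonemptiness test
def combine_singles_loop : List String → List String → String → List String
  | [], out, tmp => if tmp ≠ "" then out ++ [tmp] else out
  | s :: rest, out, tmp =>
    if PySem.Str.len s = 1 then
      combine_singles_loop rest out (tmp ++ s)
    else
      combine_singles_loop rest ((if tmp ≠ "" then out ++ [tmp] else out) ++ [s]) ""

def combine_singles (ls : List String) : List String :=
  combine_singles_loop ls [] ""

-- ===== PORT B =====
-- the groupby key: lambda s: len(s) == 1
def pvKeySingle (s : String) : Bool := PySem.Str.len s == 1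

-- itertools.groupby: maximal consecutive runs sharing the key value
def combine_singles_groups : List String → List (Bool × List String)
  | [] => []
  | s :: rest =>
    (pvKeySingle s, s :: rest.takeWhile (fun t => pvKeySingle t == pvKeySingle s)) ::
      combine_singles_groups (rest.dropWhile (fun t => pvKeySingle t == pvKeySingle s))
termination_by ls => ls.length
decreasing_by
  simp only [List.length_cons]
  exact Nat.lt_succ_of_le (List.length_dropWhile_le _ rest)

def combine_singles_alt (ls : List String) : List String :=
  (combine_singles_groups ls).flatMap
    (fun g => if g.1 then [PySem.Str.join "" g.2] else g.2)

-- ===== PRECONDITION & SPEC =====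
def Spec_combine_singles (ls : List String) (out : List String) : Prop := out = combine_singles_alt ls
instance (ls : List String) (out : List String) : Decidable (Spec_combine_singles ls out) := by unfold Spec_combine_singles; infer_instance

-- ===== CLAIM (what is proved, stated in full; the proofs are below) =====
def Claim_equal_combine_singles : Prop := ∀ (ls : List String), Dom_combine_singles ls → Spec_combine_singles ls (combine_singles ls)

-- ===== LEMMAS AND PROOFS =====

theorem pv_str_ext {a b : String} (h : a.toList = b.toList) : a = b := by
  simpa using congrArg String.ofList h

theorem pv_join_empty_nil : PySem.Str.join "" ([] : List String) = "" := by
  apply pv_str_ext; simp [PySem.Str.join, PySem.Chars.join_nil]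

theorem pv_join_empty_cons (s : String) (r : List String) :
    PySem.Str.join "" (s :: r) = s ++ PySem.Str.join "" r := by
  apply pv_str_ext
  cases r with
  | nil => simp [PySem.Str.join, PySem.Chars.join_singleton, PySem.Chars.join_nil]
  | cons y t => simp [PySem.Str.join, PySem.Chars.join_cons_cons]

theorem pv_append_ne_empty_left {s : String} (t : String) (h : s ≠ "") : s ++ t ≠ "" := by
  intro he
  apply h
  have h2 := congrArg String.toList he
  simp at h2
  exact pv_str_ext (by simp [h2.1])

theorem pv_single_ne_empty {s : String} (h : PySem.Str.len s = 1) : s ≠ "" := by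
  intro he
  subst he
  simp [PySem.Str.len] at h

theorem pv_loop_out (ls : List String) :
    ∀ out tmp, combine_singles_loop ls out tmp = out ++ combine_singles_loop ls [] tmp := by
  induction ls with
  | nil =>
    intro out tmp
    by_cases h : tmp = "" <;> simp [combine_singles_loop, h]
  | cons s rest ih =>
    intro out tmp
    simp only [combine_singles_loop]
    split_ifs with h1 h2
    · exact ih out (tmp ++ s)
    · rw [ih ((out ++ [tmp]) ++ [s]), ih (([] ++ [tmp]) ++ [s])]
      simp
    · rw [ih (out ++ [s]), ih ([] ++ [s])]
      simp

theorem pv_run_singles :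
    ∀ (run : List String), (∀ t ∈ run, PySem.Str.len t = 1) → ∀ (rest' : List String) (out : List String) (tmp : String),
      combine_singles_loop (run ++ rest') out tmp
        = combine_singles_loop rest' out (tmp ++ PySem.Str.join "" run) := by
  intro run
  induction run with
  | nil => intro _ rest' out tmp; simp [pv_join_empty_nil]
  | cons s r ih =>
    intro h rest' out tmp
    have hs : PySem.Str.len s = 1 := h s (by simp)
    simp only [List.cons_append, combine_singles_loop, if_pos hs]
    rw [ih (fun t ht => h t (by simp [ht])) rest' out (tmp ++ s)]
    rw [pv_join_empty_cons, ← String.append_assoc]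

theorem pv_run_nonsingles :
    ∀ (run : List String), (∀ t ∈ run, ¬ PySem.Str.len t = 1) → ∀ (rest' : List String) (out : List String),
      combine_singles_loop (run ++ rest') out ""
        = combine_singles_loop rest' (out ++ run) "" := by
  intro run
  induction run with
  | nil => intro _ rest' out; simp
  | cons s r ih =>
    intro h rest' out
    have hs : ¬ PySem.Str.len s = 1 := h s (by simp)
    simp only [List.cons_append, combine_singles_loop, if_neg hs, ne_eq,
      not_true_eq_false, ite_false]
    rw [ih (fun t ht => h t (by simp [ht])) rest' (out ++ [s])]
    simp

theorem pv_flush (ls : List String) (hhd : ∀ s, ls.head? = some s → ¬ PySem.Str.len s = 1)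
    (out : List String) (tmp : String) (htmp : tmp ≠ "") :
    combine_singles_loop ls out tmp = out ++ [tmp] ++ combine_singles_loop ls [] "" := by
  cases ls with
  | nil => simp [combine_singles_loop, htmp]
  | cons s rest =>
    have hs : ¬ PySem.Str.len s = 1 := hhd s rfl
    simp only [combine_singles_loop, if_neg hs, if_pos htmp, ne_eq, not_true_eq_false,
      ite_false]
    rw [pv_loop_out rest ((out ++ [tmp]) ++ [s]), pv_loop_out rest (([] : List String) ++ [s])]
    simp

theorem pv_head_dropWhile {α : Type} (p : α → Bool) :
    ∀ (l : List α) (t : α), (l.dropWhile p).head? = some t → p t = false := by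
  intro l
  induction l with
  | nil => simp [List.dropWhile]
  | cons a l ih =>
    intro t h
    by_cases hp : p a
    · rw [List.dropWhile_cons_of_pos hp] at h
      exact ih t h
    · rw [List.dropWhile_cons_of_neg hp] at h
      simp at h
      rw [← h]
      simpa using hp

theorem pv_key_eq_true_iff (t : String) : pvKeySingle t = true ↔ PySem.Str.len t = 1 := by
  simp only [pvKeySingle, beq_iff_eq]

theorem pv_main : ∀ (n : ℕ) (ls : List String), ls.length ≤ n →
    combine_singles ls = combine_singles_alt ls := by
  intro n
  induction n with
  | zero =>
    intro ls h
    have : ls = [] := List.eq_nil_of_length_eq_zero (Nat.le_zero.mp h)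
    subst this
    simp [combine_singles, combine_singles_loop, combine_singles_alt, combine_singles_groups]
  | succ n ih =>
    intro ls hlen
    cases ls with
    | nil =>
      simp [combine_singles, combine_singles_loop, combine_singles_alt, combine_singles_groups]
    | cons s rest =>
      have hsplit : rest.takeWhile (fun t => pvKeySingle t == pvKeySingle s)
          ++ rest.dropWhile (fun t => pvKeySingle t == pvKeySingle s) = rest :=
        List.takeWhile_append_dropWhile
      have hlenr : rest.length ≤ n := by simpa using hlen
      have hlen' : (rest.dropWhile (fun t => pvKeySingle t == pvKeySingle s)).length ≤ n :=
        le_trans (List.length_dropWhile_le _ _) hlenr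
      have ihr := ih _ hlen'
      have hrun : ∀ t ∈ rest.takeWhile (fun t => pvKeySingle t == pvKeySingle s),
          pvKeySingle t = pvKeySingle s := by
        intro t ht
        simpa using List.mem_takeWhile_imp ht
      have hrest' : ∀ t, (rest.dropWhile (fun t => pvKeySingle t == pvKeySingle s)).head? = some t →
          pvKeySingle t ≠ pvKeySingle s := by
        intro t ht
        have := pv_head_dropWhile _ _ _ ht
        simpa using this
      have galt : combine_singles_alt (s :: rest)
          = (if pvKeySingle s then
              [PySem.Str.join "" (s :: rest.takeWhile (fun t => pvKeySingle t == pvKeySingle s))]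
             else s :: rest.takeWhile (fun t => pvKeySingle t == pvKeySingle s))
            ++ combine_singles_alt (rest.dropWhile (fun t => pvKeySingle t == pvKeySingle s)) := by
        rw [combine_singles_alt, combine_singles_groups]
        simp [combine_singles_alt]
      by_cases hk : PySem.Str.len s = 1
      · -- head begins a run of singles
        have hks : pvKeySingle s = true := (pv_key_eq_true_iff s).mpr hk
        have hrun1 : ∀ t ∈ rest.takeWhile (fun t => pvKeySingle t == pvKeySingle s),
            PySem.Str.len t = 1 := by
          intro t ht
          exact (pv_key_eq_true_iff t).mp (by rw [hrun t ht, hks])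
        have hrest1 : ∀ t, (rest.dropWhile (fun t => pvKeySingle t == pvKeySingle s)).head? = some t →
            ¬ PySem.Str.len t = 1 := by
          intro t ht hlen1
          exact hrest' t ht (by rw [(pv_key_eq_true_iff t).mpr hlen1, hks])
        have hA : combine_singles (s :: rest)
            = [s ++ PySem.Str.join "" (rest.takeWhile (fun t => pvKeySingle t == pvKeySingle s))]
              ++ combine_singles (rest.dropWhile (fun t => pvKeySingle t == pvKeySingle s)) := by
          rw [combine_singles]
          simp only [combine_singles_loop, if_pos hk]
          conv_lhs => rw [← hsplit]
          rw [pv_run_singles _ hrun1]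
          rw [pv_flush _ hrest1 _ _
            (by
              have : ("" : String) ++ s = s := by simp
              rw [this]
              exact pv_append_ne_empty_left _ (pv_single_ne_empty hk))]
          simp [combine_singles]
        rw [hA, galt, if_pos hks, ihr, pv_join_empty_cons]
      · -- head begins a run of non-singles
        have hks : pvKeySingle s = false := by
          simp only [Bool.eq_false_iff]
          intro h
          exact hk ((pv_key_eq_true_iff s).mp h)
        have hrun0 : ∀ t ∈ rest.takeWhile (fun t => pvKeySingle t == pvKeySingle s),
            ¬ PySem.Str.len t = 1 := by
          intro t ht hlen1
          have h1 := hrun t ht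
          rw [hks, (pv_key_eq_true_iff t).mpr hlen1] at h1
          simp at h1
        have hA : combine_singles (s :: rest)
            = (s :: rest.takeWhile (fun t => pvKeySingle t == pvKeySingle s))
              ++ combine_singles (rest.dropWhile (fun t => pvKeySingle t == pvKeySingle s)) := by
          rw [combine_singles]
          simp only [combine_singles_loop, if_neg hk, ne_eq, not_true_eq_false, ite_false]
          conv_lhs => rw [← hsplit]
          rw [pv_run_nonsingles _ hrun0]
          rw [pv_loop_out]
          simp [combine_singles]
        rw [hA, galt, if_neg (by simp [hks]), ihr]

-- ===== VERDICT (by name: the statement is the Claim_ definition above) =====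
theorem combine_singles_spec : Claim_equal_combine_singles := by
  intro ls _
  unfold Spec_combine_singles
  exact pv_main ls.length ls le_rfl
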